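-- pv_equiv track=rewrite | github.com/JdanielGA/crud_app | test/registers.py | search_exact_by_name
-- ===== SOURCE A (Python) =====
-- def search_exact_by_name(registers, name_to_search):
--
--     filtered_list = []
--     idx = 0
--
--     for ref, organization in enumerate(registers):
--         if name_to_search.lower() == organization["Organization name"].lower():
--             filtered_list.append(organization)
--             idx = ref
--
--     if filtered_list:
--         client_dict = filtered_list
--         return client_dict, idx
--
--     else:
--         client_dict = None
--         idx = None
--         return client_dict, idx
-- ===== SOURCE B (Python) =====
-- def search_exact_by_name(registers, name_to_search):
--     needle = name_to_search.lower()
--     filtered = [org for org in registers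
--                 if needle == org["Organization name"].lower()]
--     if not filtered:
--         return None, None
--     for i in range(len(registers) - 1, -1, -1):
--         if needle == registers[i]["Organization name"].lower():
--             return filtered, i
-- ===== Notes on version B (the rewrite author's own statement) =====
-- stated objective: alternative
-- what changed: Replaces the single fused enumerate-loop that keeps a running last index with two separate passes: a filter comprehension building the matches, then an early-stopping reverse scan that finds the last matching index only when matches exist.
import Mathlib
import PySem

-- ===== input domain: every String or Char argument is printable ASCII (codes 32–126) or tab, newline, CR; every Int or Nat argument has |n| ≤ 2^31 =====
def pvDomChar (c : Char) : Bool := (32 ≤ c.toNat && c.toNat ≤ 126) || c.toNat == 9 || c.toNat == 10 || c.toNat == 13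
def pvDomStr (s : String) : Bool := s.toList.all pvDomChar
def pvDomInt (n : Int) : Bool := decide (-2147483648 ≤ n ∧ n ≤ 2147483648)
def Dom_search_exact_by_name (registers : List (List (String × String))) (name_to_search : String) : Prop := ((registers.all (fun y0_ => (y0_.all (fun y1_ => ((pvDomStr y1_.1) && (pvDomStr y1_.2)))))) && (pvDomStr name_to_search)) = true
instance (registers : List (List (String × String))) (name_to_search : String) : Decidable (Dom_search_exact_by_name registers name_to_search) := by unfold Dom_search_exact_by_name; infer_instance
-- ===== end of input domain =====

-- B replaces A's single fused enumerate-loop (running last index) by a filter pass plus a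
-- separate early-stopping reverse index scan; objective: alternative decomposition, same cost.


-- ===== PORT A =====
-- dict access org["Organization name"]: first match in the association list; the KeyError case
-- (no such key) is excluded by Pre_, so the .getD "" default is never reached on admitted inputs.
def seKey (org : List (String × String)) : String :=
  ((PySem.Dict.mk org).get? "Organization name").getD ""

def seStep (name_to_search : String)
    (st : List (List (String × String)) × Int) (p : Int × List (String × String)) :
    List (List (String × String)) × Int :=
  if PySem.Str.lower name_to_search == PySem.Str.lower (seKey p.2) then (st.1 ++ [p.2], p.1) else st

def search_exact_by_name (registers : List (List (String × String))) (name_to_search : String) : (Option (List (List (String × String)))) × Option Int :=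
  let st := (PySem.List.enumerate registers 0).foldl (seStep name_to_search) ([], 0)
  if st.1 ≠ [] then (some st.1, some st.2) else (none, none)

-- ===== PORT B =====
-- reverse scan: walks registers.reverse carrying the original index, stops at the first hit.
def seRevIdx (needle : String) : List (List (String × String)) → Int → Option Int
  | [], _ => none
  | org :: rest, i =>
      if needle == PySem.Str.lower (seKey org) then some i else seRevIdx needle rest (i - 1)

def search_exact_by_name_alt (registers : List (List (String × String))) (name_to_search : String) : (Option (List (List (String × String)))) × Option Int :=
  let needle := PySem.Str.lower name_to_search
  let filtered := registers.filter (fun org => needle == PySem.Str.lower (seKey org))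
  if filtered = [] then (none, none)
  else
    match seRevIdx needle registers.reverse ((registers.length : Int) - 1) with
    | some i => (some filtered, some i)
    | none => (some filtered, none)   -- unreachable: filtered ≠ [] guarantees a hit

-- ===== PRECONDITION & SPEC =====
-- Pre_ excludes exactly the inputs on which the Python A raises KeyError: some register
-- without an "Organization name" key (B raises there too).
def Pre_search_exact_by_name (registers : List (List (String × String))) (name_to_search : String) : Prop :=
  ∀ org ∈ registers, ((PySem.Dict.mk org).get? "Organization name").isSome = true
instance (registers : List (List (String × String))) (name_to_search : String) : Decidable (Pre_search_exact_by_name registers name_to_search) := by unfold Pre_search_exact_by_name; infer_instance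

def pvWitness_search_exact_by_name : (List (List (String × String))) × String :=
  ([[("Organization name", "Acme"), ("City", "Rome")], [("Organization name", "acme")]], "ACME")

def Spec_search_exact_by_name (registers : List (List (String × String))) (name_to_search : String) (out : (Option (List (List (String × String)))) × Option Int) : Prop := out = search_exact_by_name_alt registers name_to_search
instance (registers : List (List (String × String))) (name_to_search : String) (out : (Option (List (List (String × String)))) × Option Int) : Decidable (Spec_search_exact_by_name registers name_to_search out) := by unfold Spec_search_exact_by_name; infer_instance

-- ===== CLAIM (what is proved, stated in full; the proofs are below) =====
def Claim_equal_search_exact_by_name : Prop := ∀ (registers : List (List (String × String))) (name_to_search : String), Dom_search_exact_by_name registers name_to_search → Pre_search_exact_by_name registers name_to_search → Spec_search_exact_by_name registers name_to_search (search_exact_by_name registers name_to_search)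

-- ===== LEMMAS AND PROOFS =====

-- The fused loop's state equals (filter, last index from the reverse scan, default 0),
-- and the reverse scan misses exactly when the filter is empty.
theorem seLoop_eq (name : String) (regs : List (List (String × String))) :
    (PySem.List.enumerate regs 0).foldl (seStep name) ([], 0) =
      (regs.filter (fun org => PySem.Str.lower name == PySem.Str.lower (seKey org)),
       (seRevIdx (PySem.Str.lower name) regs.reverse ((regs.length : Int) - 1)).getD 0) ∧
    (seRevIdx (PySem.Str.lower name) regs.reverse ((regs.length : Int) - 1) = none ↔
      regs.filter (fun org => PySem.Str.lower name == PySem.Str.lower (seKey org)) = []) := by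
  induction regs using List.reverseRecOn with
  | nil => simp [PySem.List.enumerate_nil, seRevIdx]
  | append_singleton xs x ih =>
      obtain ⟨h1, h2⟩ := ih
      rw [PySem.List.enumerate_append, List.foldl_append, h1]
      simp only [List.reverse_append, List.reverse_cons, List.reverse_nil, List.nil_append,
        List.cons_append, List.filter_append, List.length_append, List.length_cons,
        List.length_nil, PySem.List.enumerate_cons, PySem.List.enumerate_nil,
        List.foldl_cons, List.foldl_nil, seRevIdx, seStep, List.filter]
      by_cases hm : PySem.Str.lower name == PySem.Str.lower (seKey x)
      · simp [hm]
      · rw [show ((xs.length + (0 + 1) : Nat) : Int) - 1 - 1 = (xs.length : Int) - 1 by push_cast; ring]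
        simp [hm, h2]

theorem search_exact_by_name_spec : Claim_equal_search_exact_by_name := by
  intro registers name _ _
  unfold Spec_search_exact_by_name search_exact_by_name search_exact_by_name_alt
  obtain ⟨h1, h2⟩ := seLoop_eq name registers
  simp only [h1]
  by_cases hf : registers.filter (fun org => PySem.Str.lower name == PySem.Str.lower (seKey org)) = []
  · simp [hf]
  · cases hr : seRevIdx (PySem.Str.lower name) registers.reverse ((registers.length : Int) - 1) with
    | none => exact absurd (h2.mp hr) hf
    | some i => simp [hf]
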